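-- pv_equiv track=rewrite | github.com/eovchinn/KIT_LU_pipeline | PKS.py | multiply_preds_with_lists
-- ===== SOURCE A (Python) =====
-- def multiply_preds_with_lists(objects,states_actions):
-- 	result = []
--
-- 	for (name, args) in states_actions:
-- 		multiplied = False
-- 		for j in range(0,len(args)):
-- 			a=args[j]
-- 			if (a in objects) and (objects[a][0]=="list"):
-- 				multiplied = True
-- 				for la in objects[a][1][1:]:
-- 					gargs=list(args)
-- 					gargs[j]=la
-- 					result.append((name,gargs))
-- 		if not multiplied:
-- 			result.append((name,args))
--
-- 	return result
-- ===== SOURCE B (Python) =====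
-- def multiply_preds_with_lists(objects, states_actions):
--     # Stage 1: one pass over the objects builds the substitution table once.
--     subs = {}
--     for n, v in objects.items():
--         if len(v) > 1 and v[0] == "list":
--             subs[n] = v[1][1:]
--
--     # Stage 2: recursion on the argument list with a prefix accumulator;
--     # each expandable head yields prefix + [element] + tail, no index arithmetic.
--     def gen(prefix, rest):
--         if not rest:
--             return False, []
--         a, tail = rest[0], rest[1:]
--         here = [prefix + [la] + tail for la in subs[a]] if a in subs else []
--         found, more = gen(prefix + [a], tail)
--         return (a in subs) or found, here + more
--
--     result = []
--     for name, args in states_actions: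
--         hit, variants = gen([], args)
--         if hit:
--             result.extend((name, g) for g in variants)
--         else:
--             result.append((name, args))
--     return result
-- ===== Notes on version B (the rewrite author's own statement) =====
-- stated objective: alternative
-- what changed: B first compiles the objects dict into a substitution table in one separate pass (so the per-argument type test becomes a single table lookup), then expands each action by structural recursion on its argument list with a prefix accumulator, building prefix+[element]+tail and returning a found-flag from the recursion - replacing A's index loop over range(len(args)) with its in-loop 'multiplied' flag and copy-then-assign list surgery.
import Mathlib
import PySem

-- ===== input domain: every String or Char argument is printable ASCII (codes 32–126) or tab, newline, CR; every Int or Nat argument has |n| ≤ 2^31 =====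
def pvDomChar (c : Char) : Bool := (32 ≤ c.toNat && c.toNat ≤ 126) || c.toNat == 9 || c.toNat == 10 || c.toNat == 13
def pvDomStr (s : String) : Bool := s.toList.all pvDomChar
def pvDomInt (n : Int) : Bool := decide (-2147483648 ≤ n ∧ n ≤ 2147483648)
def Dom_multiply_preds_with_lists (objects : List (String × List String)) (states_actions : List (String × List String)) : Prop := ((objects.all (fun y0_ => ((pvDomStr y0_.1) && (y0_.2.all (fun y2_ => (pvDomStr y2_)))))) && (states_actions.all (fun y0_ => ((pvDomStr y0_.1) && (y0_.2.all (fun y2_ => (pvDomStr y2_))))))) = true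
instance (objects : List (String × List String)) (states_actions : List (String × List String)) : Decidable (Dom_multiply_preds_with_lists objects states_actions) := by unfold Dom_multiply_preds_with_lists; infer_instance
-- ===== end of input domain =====

-- B precompiles the objects dict into a substitution table in a separate pass and expands
-- each action by structural recursion on its argument list with a prefix accumulator,
-- replacing A's index loop with its in-loop 'multiplied' flag (objective: alternative).

-- ===== PORT A =====
-- Literal transliteration of A. 'objects' is the Python dict as its item list;
-- 'a in objects' / 'objects[a]' is PySem.Dict lookup. 'objects[a][1][1:]' is a string
-- slice; Python iterates its characters as 1-char strings, ported as the Char list of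
-- the slice with String.singleton applied at use (exact on the stated domain).
-- Indexing args[j], objects[a][0], objects[a][1]: in-range under Pre_, ported with pyGetD.
def multiply_preds_with_lists (objects : List (String × List String)) (states_actions : List (String × List String)) : List (String × List String) :=
  states_actions.foldl
    (fun result p =>
      let name := p.1
      let args := p.2
      let st := (PySem.List.pyRange 0 (args.length : Int) 1).foldl
        (fun (st : List (String × List String) × Bool) j =>
          let a := PySem.List.pyGetD args j ""
          match (PySem.Dict.mk objects).get? a with
          | some v =>
            if PySem.List.pyGetD v 0 "" = "list" then
              ((PySem.List.slice (PySem.List.pyGetD v 1 "").toList (some 1) none).foldl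
                (fun r la =>
                  let gargs := PySem.List.pySetD args j (String.singleton la)
                  r ++ [(name, gargs)]) st.1,
               true)
            else st
          | none => st)
        (result, false)
      if st.2 = false then st.1 ++ [(name, args)] else st.1)
    []

-- ===== PORT B =====
-- B-side helper: the body of the 'subs'-building loop ('if len(v) > 1 and v[0] == "list":
-- subs[n] = v[1][1:]'); v[1][1:] is a string slice iterated as its characters.
def pvSubStep (d : PySem.Dict String (List Char)) (nv : String × List String) : PySem.Dict String (List Char) :=
  if 1 < nv.2.length ∧ PySem.List.pyGetD nv.2 0 "" = "list" then
    d.insert nv.1 (PySem.List.slice (PySem.List.pyGetD nv.2 1 "").toList (some 1) none)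
  else d

-- B-side helper: the substitution table built once from objects.items()
def pvSubs (objects : List (String × List String)) : PySem.Dict String (List Char) :=
  objects.foldl pvSubStep PySem.Dict.empty

-- B-side helper: the recursive 'gen(prefix, rest)' of Source B
def pvGen (subs : PySem.Dict String (List Char)) (pre : List String) : List String → Bool × List (List String)
  | [] => (false, [])
  | a :: tail =>
    let here : List (List String) :=
      match subs.get? a with
      | some las => las.map (fun la => pre ++ [String.singleton la] ++ tail)
      | none => []
    let rest := pvGen subs (pre ++ [a]) tail
    ((subs.get? a).isSome || rest.1, here ++ rest.2)

def multiply_preds_with_lists_alt (objects : List (String × List String)) (states_actions : List (String × List String)) : List (String × List String) :=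
  let subs := pvSubs objects
  states_actions.foldl
    (fun result p =>
      let g := pvGen subs [] p.2
      if g.1 then result ++ g.2.map (fun gargs => (p.1, gargs))
      else result ++ [(p.1, p.2)]) []

-- ===== PRECONDITION & SPEC =====
-- The second conjunct excludes exactly the inputs on which the Python A raises IndexError:
-- some action argument is a key of objects whose value list is empty (objects[a][0] raises),
-- or whose value list starts with "list" but has no second element (objects[a][1] raises).
-- The Nodup conjunct only rules out duplicate-key association lists, which do not represent
-- any Python dict input (a Python dict's keys are always distinct).
def Pre_multiply_preds_with_lists (objects : List (String × List String)) (states_actions : List (String × List String)) : Prop :=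
  (objects.map Prod.fst).Nodup ∧
  (states_actions.all (fun p =>
    p.2.all (fun a =>
      match (PySem.Dict.mk objects).get? a with
      | some v => !v.isEmpty && (if v.head? = some "list" then decide (2 ≤ v.length) else true)
      | none => true))) = true
instance (objects : List (String × List String)) (states_actions : List (String × List String)) : Decidable (Pre_multiply_preds_with_lists objects states_actions) := by unfold Pre_multiply_preds_with_lists; infer_instance

def pvWitness_multiply_preds_with_lists : (List (String × List String)) × (List (String × List String)) :=
  ([("x", ["list", "abc"]), ("y", ["atom"])], [("go", ["x", "y"]), ("do", ["y"])])

def Spec_multiply_preds_with_lists (objects : List (String × List String)) (states_actions : List (String × List String)) (out : List (String × List String)) : Prop := out = multiply_preds_with_lists_alt objects states_actions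
instance (objects : List (String × List String)) (states_actions : List (String × List String)) (out : List (String × List String)) : Decidable (Spec_multiply_preds_with_lists objects states_actions out) := by unfold Spec_multiply_preds_with_lists; infer_instance

-- ===== CLAIM (what is proved, stated in full; the proofs are below) =====
def Claim_equal_multiply_preds_with_lists : Prop := ∀ (objects : List (String × List String)) (states_actions : List (String × List String)), Dom_multiply_preds_with_lists objects states_actions → Pre_multiply_preds_with_lists objects states_actions → Spec_multiply_preds_with_lists objects states_actions (multiply_preds_with_lists objects states_actions)

-- ===== LEMMAS AND PROOFS =====

theorem pvFlatten_singleton {α β : Type} (l : List α) (f : α → β) :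
    (l.map (fun x => [f x])).flatten = l.map f := by
  induction l with
  | nil => rfl
  | cons a l ih => simp [ih]

-- A's test-and-extract on one enumerated pair (j, a = args[j]) (proof-side).
def pvTest (objects : List (String × List String)) (ja : Int × String) : Option (Int × List Char) :=
  match (PySem.Dict.mk objects).get? ja.2 with
  | some v =>
    if PySem.List.pyGetD v 0 "" = "list" then
      some (ja.1, PySem.List.slice (PySem.List.pyGetD v 1 "").toList (some 1) none)
    else none
  | none => none

-- A's inner body, lambda-lifted over the enumerated pair (j, a = args[j]).
def pvInnerBody (objects : List (String × List String)) (name : String) (args : List String)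
    (st : List (String × List String) × Bool) (ja : Int × String) : List (String × List String) × Bool :=
  match (PySem.Dict.mk objects).get? ja.2 with
  | some v =>
    if PySem.List.pyGetD v 0 "" = "list" then
      ((PySem.List.slice (PySem.List.pyGetD v 1 "").toList (some 1) none).foldl
        (fun r la => r ++ [(name, PySem.List.pySetD args ja.1 (String.singleton la))]) st.1,
       true)
    else st
  | none => st

-- the generator A uses (copy-and-assign form)
def pvGenA (objects : List (String × List String)) (name : String) (args : List String)
    (ps : List (Int × String)) : List (String × List String) :=
  (ps.filterMap (pvTest objects)).flatMap (fun jl =>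
    jl.2.map (fun la => (name, PySem.List.pySetD args jl.1 (String.singleton la))))

-- A's per-action step, lambda-lifted.
def pvStepA (objects : List (String × List String)) (result : List (String × List String))
    (p : String × List String) : List (String × List String) :=
  let st := (PySem.List.pyRange 0 (p.2.length : Int) 1).foldl
    (fun st j => pvInnerBody objects p.1 p.2 st (j, PySem.List.pyGetD p.2 j ""))
    (result, false)
  if st.2 = false then st.1 ++ [(p.1, p.2)] else st.1

theorem pvPortA_eq (objects states_actions : List (String × List String)) :
    multiply_preds_with_lists objects states_actions = states_actions.foldl (pvStepA objects) [] := rfl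

theorem pvInner_foldl (objects : List (String × List String)) (name : String) (args : List String)
    (ps : List (Int × String)) (r : List (String × List String)) (m : Bool) :
    ps.foldl (pvInnerBody objects name args) (r, m)
      = (r ++ pvGenA objects name args ps, m || !(ps.filterMap (pvTest objects)).isEmpty) := by
  induction ps generalizing r m with
  | nil => simp [pvGenA]
  | cons ja ps ih =>
    simp only [List.foldl_cons]
    have hbody : pvInnerBody objects name args (r, m) ja
        = (r ++ (pvTest objects ja).elim [] (fun jl =>
             jl.2.map (fun la => (name, PySem.List.pySetD args jl.1 (String.singleton la)))),
           m || (pvTest objects ja).isSome) := by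
      unfold pvInnerBody pvTest
      cases h : (PySem.Dict.mk objects).get? ja.2 with
      | none => simp
      | some v =>
        by_cases hc : PySem.List.pyGetD v 0 "" = "list" <;>
          simp [hc, pvFlatten_singleton]
    rw [hbody, ih]
    cases h : pvTest objects ja with
    | none => simp [pvGenA, h]
    | some jl => simp [pvGenA, h, List.flatMap_cons]

-- the per-name condition Pre_ grants for every referenced argument (proof-side)
def pvCond (objects : List (String × List String)) (a : String) : Prop :=
  match (PySem.Dict.mk objects).get? a with
  | some v => v ≠ [] ∧ (v.head? = some "list" → 2 ≤ v.length)
  | none => True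

theorem pvFoldl_substep_get_not_mem (a : String) :
    ∀ (l : List (String × List String)) (d : PySem.Dict String (List Char)),
      a ∉ l.map Prod.fst → (l.foldl pvSubStep d).get? a = d.get? a := by
  intro l
  induction l with
  | nil => intro d _; rfl
  | cons p l ih =>
    intro d hmem
    simp only [List.map_cons, List.mem_cons] at hmem
    push Not at hmem
    simp only [List.foldl_cons]
    rw [ih _ hmem.2]
    unfold pvSubStep
    split
    · exact PySem.Dict.get?_insert_of_ne d _ hmem.1
    · rfl

theorem pvFoldl_substep_get (a : String) :
    ∀ (l : List (String × List String)) (d : PySem.Dict String (List Char)),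
      (l.map Prod.fst).Nodup → d.get? a = none →
      (l.foldl pvSubStep d).get? a
        = (match (PySem.Dict.mk l).get? a with
           | some v =>
             if 1 < v.length ∧ PySem.List.pyGetD v 0 "" = "list" then
               some (PySem.List.slice (PySem.List.pyGetD v 1 "").toList (some 1) none)
             else none
           | none => none) := by
  intro l
  induction l with
  | nil => intro d _ hd; simpa using hd
  | cons p l ih =>
    intro d hnd hd
    simp only [List.map_cons, List.nodup_cons] at hnd
    simp only [List.foldl_cons]
    rw [PySem.Dict.get?_mk_cons]
    by_cases he : p.1 = a
    · subst he
      rw [pvFoldl_substep_get_not_mem _ _ _ hnd.1]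
      unfold pvSubStep
      split
      · next hc => simp [PySem.Dict.get?_insert_self, hc]
      · next hc => simp [hd, hc]
    · have hstep : (pvSubStep d p).get? a = none := by
        unfold pvSubStep
        split
        · rw [PySem.Dict.get?_insert_of_ne d _ (fun h => he h.symm)]; exact hd
        · exact hd
      rw [ih _ hnd.2 hstep]
      simp [show (p.1 == a) = false from beq_eq_false_iff_ne.2 he]

theorem pvSubs_get (objects : List (String × List String)) (a : String)
    (hnd : (objects.map Prod.fst).Nodup) :
    (pvSubs objects).get? a
      = (match (PySem.Dict.mk objects).get? a with
         | some v =>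
           if 1 < v.length ∧ PySem.List.pyGetD v 0 "" = "list" then
             some (PySem.List.slice (PySem.List.pyGetD v 1 "").toList (some 1) none)
           else none
         | none => none) :=
  pvFoldl_substep_get a objects PySem.Dict.empty hnd (PySem.Dict.get?_empty a)

-- under Pre_'s per-name condition, the table lookup coincides with A's in-loop test
theorem pvSubs_eq_test (objects : List (String × List String)) (a : String) (j : Int)
    (hnd : (objects.map Prod.fst).Nodup) (hc : pvCond objects a) :
    pvTest objects (j, a) = ((pvSubs objects).get? a).map (fun las => (j, las)) := by
  rw [pvSubs_get objects a hnd]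
  unfold pvTest pvCond at *
  cases hg : (PySem.Dict.mk objects).get? a with
  | none => simp
  | some v =>
    rw [hg] at hc
    obtain ⟨hne, hlen⟩ := hc
    by_cases hl : PySem.List.pyGetD v 0 "" = "list"
    · have hh : v.head? = some "list" := by
        cases v with
        | nil => exact absurd rfl hne
        | cons x t =>
          simp only [List.head?_cons]
          simpa [PySem.List.pyGetD_zero] using hl
      have h2 : 1 < v.length := hlen hh
      simp [hl, h2]
    · simp [hl]

theorem pvSet_at_prefix (x : String) : ∀ (p t : List String) (a : String),
    (p ++ a :: t).set p.length x = p ++ x :: t := by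
  intro p
  induction p with
  | nil => intro t a; rfl
  | cons q p ih => intro t a; simp [List.set_cons_succ, ih]

theorem pvGen_eq (objects : List (String × List String))
    (hnd : (objects.map Prod.fst).Nodup) :
    ∀ (rest pre : List String), (∀ a ∈ rest, pvCond objects a) →
      pvGen (pvSubs objects) pre rest
        = (!((PySem.List.enumerate rest (pre.length : Int)).filterMap (pvTest objects)).isEmpty,
           ((PySem.List.enumerate rest (pre.length : Int)).filterMap (pvTest objects)).flatMap
             (fun jl => jl.2.map (fun la =>
               PySem.List.pySetD (pre ++ rest) jl.1 (String.singleton la)))) := by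
  intro rest
  induction rest with
  | nil => intro pre _; simp [pvGen, PySem.List.enumerate_nil]
  | cons a tail ih =>
    intro pre hc
    have hca : pvCond objects a := hc a (List.mem_cons_self)
    have hct : ∀ b ∈ tail, pvCond objects b := fun b hb => hc b (List.mem_cons_of_mem _ hb)
    have hih := ih (pre ++ [a]) hct
    rw [PySem.List.enumerate_cons]
    have hlen : ((pre ++ [a]).length : Int) = (pre.length : Int) + 1 := by
      simp [List.length_append]
    have hargs : (pre ++ [a]) ++ tail = pre ++ a :: tail := by
      simp
    rw [hlen, hargs] at hih
    rw [List.filterMap_cons, pvSubs_eq_test objects a (pre.length : Int) hnd hca]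
    have hset : ∀ la : Char,
        PySem.List.pySetD (pre ++ a :: tail) (pre.length : Int) (String.singleton la)
          = pre ++ [String.singleton la] ++ tail := by
      intro la
      rw [PySem.List.pySetD_natCast, pvSet_at_prefix]
      simp
    simp only [pvGen]
    cases hs : (pvSubs objects).get? a with
    | none => simp [hih]
    | some las =>
      simp only [Option.map_some, Option.isSome_some, Bool.true_or, List.flatMap_cons,
        List.isEmpty_cons, Bool.not_false, hih]
      simp [hset]

theorem pvStepB_eq (objects : List (String × List String)) (p : String × List String)
    (r : List (String × List String))
    (hnd : (objects.map Prod.fst).Nodup) (hc : ∀ a ∈ p.2, pvCond objects a) :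
    pvStepA objects r p
      = (let g := pvGen (pvSubs objects) [] p.2;
         if g.1 then r ++ g.2.map (fun gargs => (p.1, gargs))
         else r ++ [(p.1, p.2)]) := by
  unfold pvStepA
  have henum : PySem.List.enumerate p.2 0
      = (PySem.List.pyRange 0 (p.2.length : Int) 1).map (fun j => (j, PySem.List.pyGetD p.2 j "")) := by
    simpa using PySem.List.enumerate_eq_map_pyRange p.2 ""
  rw [show (PySem.List.pyRange 0 (p.2.length : Int) 1).foldl
        (fun st j => pvInnerBody objects p.1 p.2 st (j, PySem.List.pyGetD p.2 j "")) (r, false)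
      = (PySem.List.enumerate p.2 0).foldl (pvInnerBody objects p.1 p.2) (r, false) by
        rw [henum, List.foldl_map]]
  rw [pvInner_foldl]
  have hgen := pvGen_eq objects hnd p.2 [] hc
  simp only [List.length_nil, Nat.cast_zero, List.nil_append] at hgen
  rw [hgen]
  simp only [pvGenA]
  cases he : ((PySem.List.enumerate p.2 0).filterMap (pvTest objects)).isEmpty with
  | true => simp [List.isEmpty_iff.1 he]
  | false =>
    simp only [Bool.not_false, Bool.false_or]
    simp [List.map_flatMap, List.map_map, Function.comp_def]

-- ===== VERDICT (by name: the statement is the Claim_ definition above) =====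
theorem multiply_preds_with_lists_spec : Claim_equal_multiply_preds_with_lists := by
  intro objects states_actions _ hpre
  obtain ⟨hnd, hall⟩ := hpre
  unfold Spec_multiply_preds_with_lists multiply_preds_with_lists_alt
  rw [pvPortA_eq]
  have hcond : ∀ p ∈ states_actions, ∀ a ∈ p.2, pvCond objects a := by
    intro p hp a ha
    have h1 := (List.all_eq_true.1 hall) p hp
    have h2 := (List.all_eq_true.1 h1) a ha
    unfold pvCond
    cases hg : (PySem.Dict.mk objects).get? a with
    | none => trivial
    | some v =>
      rw [hg] at h2
      simp only [Bool.and_eq_true, Bool.not_eq_true'] at h2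
      refine ⟨by simpa [List.isEmpty_iff] using h2.1, fun hh => ?_⟩
      have := h2.2
      rw [if_pos hh] at this
      exact of_decide_eq_true this
  have main : ∀ (sa : List (String × List String)),
      (∀ p ∈ sa, ∀ a ∈ p.2, pvCond objects a) →
      ∀ r, sa.foldl (pvStepA objects) r
        = sa.foldl (fun result p =>
            let g := pvGen (pvSubs objects) [] p.2
            if g.1 then result ++ g.2.map (fun gargs => (p.1, gargs))
            else result ++ [(p.1, p.2)]) r := by
    intro sa
    induction sa with
    | nil => intro _ _; rfl
    | cons p sa ih =>
      intro h r
      simp only [List.foldl_cons]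
      rw [pvStepB_eq objects p r hnd (h p List.mem_cons_self)]
      exact ih (fun q hq => h q (List.mem_cons_of_mem _ hq)) _
  exact main states_actions hcond []
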